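-- pv_equiv track=rewrite | github.com/Flexy2006/ege | 16413177/17.py | f
-- ===== SOURCE A (Python) =====
-- def f(x):
--     if x<3:
--         return 1
--     if x>2:
--         q = 0
--         for i in range(x):
--             q += f(i)
--         return q
-- ===== SOURCE B (Python) =====
-- def f(x):
--     if x < 3:
--         return 1
--     q = 3
--     for _ in range(3, x):
--         q += q
--     return q
-- ===== Notes on version B (the rewrite author's own statement) =====
-- stated objective: alternative
-- what changed: Replaces the exponential mutual recursion summing f over all smaller indices with a single bottom-up loop that maintains the running prefix sum, which doubles on every step.
import Mathlib
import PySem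

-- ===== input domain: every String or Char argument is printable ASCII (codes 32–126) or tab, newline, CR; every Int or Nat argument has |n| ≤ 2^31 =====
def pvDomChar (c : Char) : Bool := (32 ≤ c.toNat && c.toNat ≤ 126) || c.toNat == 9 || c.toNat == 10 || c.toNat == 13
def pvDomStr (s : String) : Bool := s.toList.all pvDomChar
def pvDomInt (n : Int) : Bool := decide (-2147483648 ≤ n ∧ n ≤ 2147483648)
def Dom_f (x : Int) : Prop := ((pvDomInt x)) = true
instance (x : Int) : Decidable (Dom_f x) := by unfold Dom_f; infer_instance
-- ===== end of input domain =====

-- B replaces A's exponential recursion with a linear loop keeping the running prefix sum (alternative algorithm; intended as faster, but a timing run could not confirm it because A times out on its larger inputs).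

-- ===== PORT A =====
-- A recurses on nonnegative arguments only (range(x) yields i with 0 ≤ i < x),
-- so the recursion is carried by a Nat-indexed helper; the branch order matches A.
def fNatA : Nat → Int
  | n =>
    if n < 3 then 1
    else (List.range n).attach.foldl (fun q i => q + fNatA i.1) 0
termination_by n => n
decreasing_by simpa using i.2

def f (x : Int) : Int :=
  if x < 3 then 1 else fNatA x.toNat

-- ===== PORT B =====
def f_alt (x : Int) : Int :=
  if x < 3 then 1
  else (PySem.List.pyRange 3 x 1).foldl (fun q _ => q + q) 3

-- ===== PRECONDITION & SPEC =====
def Spec_f (x : Int) (out : Int) : Prop := out = f_alt x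
instance (x : Int) (out : Int) : Decidable (Spec_f x out) := by unfold Spec_f; infer_instance

-- ===== CLAIM (what is proved, stated in full; the proofs are below) =====
def Claim_equal_f : Prop := ∀ (x : Int), Dom_f x → Spec_f x (f x)

-- ===== LEMMAS AND PROOFS =====

theorem fNatA_sum (n : Nat) (h : ¬ n < 3) :
    fNatA n = (List.range n).foldl (fun q i => q + fNatA i) 0 := by
  rw [fNatA]
  simp [h]

theorem fNatA_small (n : Nat) (h : n < 3) : fNatA n = 1 := by
  rw [fNatA]; simp [h]

theorem fNatA_closed (k : Nat) : fNatA (3 + k) = 3 * 2 ^ k := by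
  induction k with
  | zero =>
    rw [Nat.add_zero, fNatA_sum 3 (by omega)]
    simp [List.range_succ, fNatA_small]
  | succ k ih =>
    rw [fNatA_sum (3 + (k + 1)) (by omega)]
    have : 3 + (k + 1) = (3 + k) + 1 := by omega
    rw [this, List.range_succ, List.foldl_append]
    rw [← fNatA_sum (3 + k) (by omega)]
    simp [ih]
    ring

theorem foldl_double (l : List Int) (c : Int) :
    l.foldl (fun q _ => q + q) c = c * 2 ^ l.length := by
  induction l generalizing c with
  | nil => simp
  | cons a t ih => simp [List.foldl_cons, ih]; ring

-- ===== VERDICT (by name: the statement is the Claim_ definition above) =====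
theorem f_spec : Claim_equal_f := by
  intro x _
  unfold Spec_f f f_alt
  by_cases h : x < 3
  · simp [h]
  · simp only [h, if_false]
    rw [foldl_double, PySem.List.length_pyRange_one]
    have hx : x.toNat = 3 + (x - 3).toNat := by omega
    rw [hx, fNatA_closed]
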